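-- pv_equiv track=rewrite | github.com/kremato/python-csv-reader | main.py | get_last_section_index
-- ===== SOURCE A (Python) =====
-- def get_last_section_index(line: str) -> int:
--
--     comma: int = line.find(',')
--
--     if comma == -1:
--         return len(line)-1
--
--     if not line.startswith('"'):
--         return comma-1
--
--     previous: str = line[0]
--     for index, current in enumerate(line[1:]):
--         if current == '"' and previous != '\\':
--             comma = index+1
--             break
--         previous = current
--     return comma
-- ===== SOURCE B (Python) =====
-- def get_last_section_index(line: str) -> int:
--     comma = line.find(',')
--     if comma == -1:
--         return len(line) - 1
--     if not line.startswith('"'):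
--         return comma - 1
--     # jump from quote occurrence to quote occurrence instead of scanning chars
--     pos = line.find('"', 1)
--     while pos != -1:
--         if line[pos - 1] != '\\':
--             return pos
--         pos = line.find('"', pos + 1)
--     return comma
-- ===== Notes on version B (the rewrite author's own statement) =====
-- stated objective: alternative
-- what changed: A's stateful per-character loop tracking the previous character is replaced by a per-occurrence loop that jumps between quote positions with str.find using a start offset and inspects the character just before each found quote, so characters between quotes are never examined by Python-level code.
import Mathlib
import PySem

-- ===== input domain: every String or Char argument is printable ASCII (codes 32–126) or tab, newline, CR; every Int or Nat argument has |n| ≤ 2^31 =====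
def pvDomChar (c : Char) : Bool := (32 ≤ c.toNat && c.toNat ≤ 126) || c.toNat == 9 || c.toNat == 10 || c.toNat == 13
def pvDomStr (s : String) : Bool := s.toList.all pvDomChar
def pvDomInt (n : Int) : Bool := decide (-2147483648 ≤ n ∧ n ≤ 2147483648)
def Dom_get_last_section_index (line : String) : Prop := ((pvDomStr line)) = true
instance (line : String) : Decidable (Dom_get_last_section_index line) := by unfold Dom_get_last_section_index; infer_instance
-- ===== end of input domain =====

-- B replaces A's stateful per-character loop (mutable previous/comma, break) by a loop
-- that jumps between quote occurrences via str.find with a start offset and inspects the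
-- character just before each found quote; objective: alternative traversal, same cost.

-- ===== PORT A =====
-- the for-loop over enumerate(line[1:]) with mutable previous/comma and break
def pvALoop : List Char → Nat → Char → Int → Int
  | [], _, _, comma => comma
  | current :: rest, index, previous, comma =>
      if current = '"' ∧ previous ≠ '\\' then (index : Int) + 1
      else pvALoop rest (index + 1) current comma

def get_last_section_index (line : String) : Int :=
  let comma := PySem.Str.find line ","
  if comma = -1 then PySem.Str.len line - 1
  else if ¬ PySem.Str.startswith line "\"" then comma - 1
  else
    -- previous = line[0]; line is nonempty here (it contains ','), so the default is unreachable
    pvALoop (PySem.List.slice line.toList (some 1) none) 0 (line.toList.headD ' ') comma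

-- ===== PORT B =====
-- line.find('"', start) for a nonnegative in-range start, ported by hand (exact there:
-- the first index ≥ start holding '"'; none = Python's -1)
def pvFindFrom (cs : List Char) (start : Nat) : Option Nat :=
  ((cs.drop start).findIdx? (fun c => c = '"')).map (· + start)

-- bounds needed by the while-loop's termination (cited by decreasing_by)
theorem pvFindFrom_some_bounds {cs : List Char} {start p : Nat}
    (h : pvFindFrom cs start = some p) : start ≤ p ∧ p < cs.length := by
  unfold pvFindFrom at h
  rcases Option.map_eq_some_iff.mp h with ⟨k, hk, rfl⟩
  have hlt := (List.findIdx?_eq_some_iff_findIdx_eq.mp hk).1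
  have hdl : (cs.drop start).length = cs.length - start := List.length_drop ..
  omega

-- the while pos != -1 loop
def pvBLoop (cs : List Char) (comma : Int) (start : Nat) : Int :=
  match h : pvFindFrom cs start with
  | none => comma
  | some p =>
      if PySem.List.pyGet? cs ((p : Int) - 1) ≠ some '\\' then (p : Int)
      else pvBLoop cs comma (p + 1)
termination_by cs.length - start
decreasing_by
  have := pvFindFrom_some_bounds h
  omega

def get_last_section_index_alt (line : String) : Int :=
  let comma := PySem.Str.find line ","
  if comma = -1 then PySem.Str.len line - 1
  else if ¬ PySem.Str.startswith line "\"" then comma - 1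
  else pvBLoop line.toList comma 1

-- ===== PRECONDITION & SPEC =====
def Spec_get_last_section_index (line : String) (out : Int) : Prop := out = get_last_section_index_alt line
instance (line : String) (out : Int) : Decidable (Spec_get_last_section_index line out) := by unfold Spec_get_last_section_index; infer_instance

-- ===== CLAIM (what is proved, stated in full; the proofs are below) =====
def Claim_equal_get_last_section_index : Prop := ∀ (line : String), Dom_get_last_section_index line → Spec_get_last_section_index line (get_last_section_index line)

-- ===== LEMMAS AND PROOFS =====

-- A's loop over a quote-free list never fires
theorem pvALoop_noquote {l : List Char} (h : '"' ∉ l) (idx : Nat) (prev : Char) (comma : Int) :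
    pvALoop l idx prev comma = comma := by
  induction l generalizing idx prev with
  | nil => rfl
  | cons c rs ih =>
      have hc : c ≠ '"' := fun hc => h (hc ▸ List.mem_cons_self)
      have : ¬ (c = '"' ∧ prev ≠ '\\') := fun hp => hc hp.1
      simp only [pvALoop, if_neg this]
      exact ih (fun hm => h (List.mem_cons_of_mem _ hm)) _ _

-- A's loop skips a quote-free prefix, carrying its last char as 'previous'
theorem pvALoop_skip {seg : List Char} (h : '"' ∉ seg) (rest : List Char)
    (idx : Nat) (prev : Char) (comma : Int) :
    pvALoop (seg ++ rest) idx prev comma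
      = pvALoop rest (idx + seg.length) (seg.getLastD prev) comma := by
  induction seg generalizing idx prev with
  | nil => simp
  | cons c rs ih =>
      have hc : c ≠ '"' := fun hc => h (hc ▸ List.mem_cons_self)
      have hnp : ¬ (c = '"' ∧ prev ≠ '\\') := fun hp => hc hp.1
      simp only [List.cons_append, pvALoop, if_neg hnp]
      rw [ih (fun hm => h (List.mem_cons_of_mem _ hm))]
      congr 1
      · simp [List.length_cons]; omega
      · cases rs <;> simp [List.getLastD]

-- one unfolding step of A's loop
theorem pvALoop_cons (c : Char) (rest : List Char) (idx : Nat) (prev : Char) (comma : Int) :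
    pvALoop (c :: rest) idx prev comma
      = if c = '"' ∧ prev ≠ '\\' then (idx : Int) + 1
        else pvALoop rest (idx + 1) c comma := rfl

-- the heart: from any start s ≥ 1, A's remaining scan equals B's find-jump loop
theorem pvLoop_agree (cs : List Char) (comma : Int) (s : Nat) (h1 : 1 ≤ s) (h2 : s ≤ cs.length) :
    pvALoop (cs.drop s) (s - 1) (cs.getD (s - 1) ' ') comma = pvBLoop cs comma s := by
  rw [pvBLoop]
  split
  · -- pvFindFrom cs s = none: no quote after s, both loops fall through to comma
    rename_i hfind
    unfold pvFindFrom at hfind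
    rw [Option.map_eq_none_iff, List.findIdx?_eq_none_iff] at hfind
    apply pvALoop_noquote
    intro hmem
    have := hfind _ hmem
    simp at this
  · -- pvFindFrom cs s = some p: first quote at p
    rename_i p hfind
    unfold pvFindFrom at hfind
    rcases Option.map_eq_some_iff.mp hfind with ⟨k, hk, hp⟩
    obtain ⟨hklt, hpk, hprior⟩ := List.findIdx?_eq_some_iff_getElem.mp hk
    have hdl : (cs.drop s).length = cs.length - s := List.length_drop ..
    have hplt : p < cs.length := by omega
    have hps : s ≤ p := by omega
    have hq? : cs[p]? = some '"' := by
      have h1 : (cs.drop s)[k]? = some ((cs.drop s)[k]'hklt) := List.getElem?_eq_getElem hklt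
      rw [List.getElem?_drop, show s + k = p by omega] at h1
      rw [h1]
      simp only [decide_eq_true_eq] at hpk
      rw [hpk]
    have hquote : cs[p]'hplt = '"' := by
      have := List.getElem?_eq_getElem hplt
      rw [hq?] at this
      exact (Option.some.injEq ..).mp this.symm
    have hnoq : ∀ j (hj : j < cs.length), s ≤ j → j < p → cs[j]'hj ≠ '"' := by
      intro j hj hsj hjp hcj
      have hjk : j - s < k := by omega
      have hdj : (cs.drop s)[j - s]? = some '"' := by
        rw [List.getElem?_drop, show s + (j - s) = j by omega,
          List.getElem?_eq_getElem hj, hcj]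
      have hdj2 := List.getElem?_eq_getElem (show j - s < (cs.drop s).length by omega)
      rw [hdj] at hdj2
      have := hprior (j - s) hjk
      rw [← (Option.some.injEq ..).mp hdj2] at this
      simp at this
    -- split the scanned suffix at the quote
    have hsplit : cs.drop s = (cs.drop s).take k ++ cs.drop p := by
      conv_lhs => rw [← List.take_append_drop k (cs.drop s)]
      rw [List.drop_drop, show s + k = p by omega]
    have hseg : '"' ∉ (cs.drop s).take k := by
      intro hmem
      obtain ⟨j, hj, hjeq⟩ := List.getElem_of_mem hmem
      have hjk : j < k := by simp [List.length_take] at hj; omega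
      have hjq : (cs.drop s)[j]? = some '"' := by
        rw [← List.getElem?_take_of_lt hjk, List.getElem?_eq_getElem hj, hjeq]
      rw [List.getElem?_drop] at hjq
      have := List.getElem?_eq_getElem (show s + j < cs.length by omega)
      rw [hjq] at this
      exact hnoq (s + j) (by omega) (by omega) (by omega)
        ((Option.some.injEq ..).mp this.symm)
    rw [hsplit, pvALoop_skip hseg]
    have hlen : ((cs.drop s).take k).length = k := by simp [List.length_take]; omega
    have hlast : ((cs.drop s).take k).getLastD (cs.getD (s - 1) ' ') = cs.getD (p - 1) ' ' := by
      rw [List.getLastD_eq_getLast?, List.getLast?_eq_getElem?, hlen]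
      rcases Nat.eq_zero_or_pos k with hk0 | hkpos
      · subst hk0
        simp only [List.take_zero]
        rw [show (0 : Nat) - 1 = 0 by omega]
        simp only [List.getElem?_nil, Option.getD_none]
        congr 1
        omega
      · have : ((cs.drop s).take k)[k - 1]? = cs[p - 1]? := by
          rw [List.getElem?_take_of_lt (by omega), List.getElem?_drop,
            show s + (k - 1) = p - 1 by omega]
        rw [this, List.getElem?_eq_getElem (show p - 1 < cs.length by omega)]
        rw [List.getD_eq_getElem _ _ (show p - 1 < cs.length by omega)]
        rfl
    rw [hlast, hlen]
    have hprev : cs.getD (p - 1) ' ' = cs[p-1]'(by omega) := List.getD_eq_getElem _ _ (by omega)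
    have hget : PySem.List.pyGet? cs ((p : Int) - 1) = some (cs[p-1]'(by omega)) := by
      rw [show ((p : Int) - 1) = ((p - 1 : Nat) : Int) by omega, PySem.List.pyGet?_natCast]
      exact List.getElem?_eq_getElem (by omega)
    have hdropp : cs.drop p = cs[p]'hplt :: cs.drop (p + 1) := List.drop_eq_getElem_cons hplt
    rw [hdropp, hquote]
    by_cases hb : cs[p-1]'(by omega) = '\\'
    · -- escaped: A keeps scanning, B jumps to the next quote
      rw [pvALoop_cons, if_neg (show ¬ ('"' = '"' ∧ cs.getD (p-1) ' ' ≠ '\\') by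
        rw [hprev]; simp [hb])]
      rw [if_neg (show ¬ (PySem.List.pyGet? cs ((p : Int) - 1) ≠ some '\\') by
        rw [hget]; simp [hb])]
      have hrec := pvLoop_agree cs comma (p + 1) (by omega) (by omega)
      rw [show s - 1 + k + 1 = p + 1 - 1 by omega]
      rw [show cs.getD (p + 1 - 1) ' ' = '"' by
        rw [show p + 1 - 1 = p by omega, List.getD_eq_getElem _ _ hplt, hquote]] at hrec
      exact hrec
    · -- unescaped: both return p
      rw [pvALoop_cons, if_pos (show '"' = '"' ∧ cs.getD (p-1) ' ' ≠ '\\' by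
        rw [hprev]; exact ⟨rfl, hb⟩)]
      rw [if_pos (show PySem.List.pyGet? cs ((p : Int) - 1) ≠ some '\\' by
        rw [hget]; simp [hb])]
      push_cast
      omega
termination_by cs.length - s
decreasing_by omega

-- ===== VERDICT (by name: the statement is the Claim_ definition above) =====
theorem get_last_section_index_spec : Claim_equal_get_last_section_index := by
  intro line _
  unfold Spec_get_last_section_index get_last_section_index get_last_section_index_alt
  simp only [PySem.Str.find_eq, PySem.Str.startswith_eq, PySem.Str.len_eq,
    show ("," : String).toList = [','] from rfl, show ("\"" : String).toList = ['"'] from rfl]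
  by_cases hc : PySem.Chars.find line.toList [','] = -1
  · simp [hc]
  · cases hcs : line.toList with
    | nil =>
        exfalso
        apply hc
        rw [hcs, PySem.Chars.find_eq_neg_one_iff]
        simp
    | cons c rest =>
        rw [hcs] at hc
        have hsw : PySem.Chars.startswith (c :: rest) ['"'] = decide (c = '"') := by
          rcases Decidable.em (c = '"') with h | h
          · subst h
            simp [PySem.Chars.startswith_iff, List.cons_prefix_cons]
          · simp only [h, decide_false]
            rw [Bool.eq_false_iff]
            intro hcon
            rw [PySem.Chars.startswith_iff, List.cons_prefix_cons] at hcon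
            exact h hcon.1.symm
        rcases Decidable.em (c = '"') with h | h
        · subst h
          have hsl : PySem.List.slice ('"' :: rest) (some 1) none = rest := by
            rw [PySem.List.slice_from_one]; rfl
          have hmain := pvLoop_agree ('"' :: rest) (PySem.Chars.find ('"' :: rest) [','])
            1 le_rfl (by simp)
          simp only [List.drop_one, List.tail_cons] at hmain
          simp only [hc, hsw, hsl, decide_true, List.headD_cons]
          simp only [if_false]
          exact hmain
        · simp [hc, hsw, h]
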